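-- pv_equiv track=rewrite | github.com/Paul-31415/soundplay | ftm_read.py | dotf
-- ===== SOURCE A (Python) =====
-- def dotf(r,v=[],default=1):
--     t = 0
--     for i in range(len(r)):
--         if i >= len(v):
--             t += default*r[i]
--         else:
--             t += v[i]*r[i]
--     return t
-- ===== SOURCE B (Python) =====
-- def dotf(r, v=[], default=1):
--     # Algebraic reformulation: treat every entry of r as weighted by default,
--     # then correct the overlap where v overrides it: d*sum(r) + sum((vi-d)*ri).
--     t = default * sum(r)
--     for vi, ri in zip(v, r):
--         t += (vi - default) * ri
--     return t
-- ===== Notes on version B (the rewrite author's own statement) =====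
-- stated objective: alternative
-- what changed: Replaces the indexed loop with an in/else branch by an algebraic reformulation: default*sum(r) plus a correction sum (v[i]-default)*r[i] over the zipped overlap, so no element is ever classified as overlap vs tail.
import Mathlib
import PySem

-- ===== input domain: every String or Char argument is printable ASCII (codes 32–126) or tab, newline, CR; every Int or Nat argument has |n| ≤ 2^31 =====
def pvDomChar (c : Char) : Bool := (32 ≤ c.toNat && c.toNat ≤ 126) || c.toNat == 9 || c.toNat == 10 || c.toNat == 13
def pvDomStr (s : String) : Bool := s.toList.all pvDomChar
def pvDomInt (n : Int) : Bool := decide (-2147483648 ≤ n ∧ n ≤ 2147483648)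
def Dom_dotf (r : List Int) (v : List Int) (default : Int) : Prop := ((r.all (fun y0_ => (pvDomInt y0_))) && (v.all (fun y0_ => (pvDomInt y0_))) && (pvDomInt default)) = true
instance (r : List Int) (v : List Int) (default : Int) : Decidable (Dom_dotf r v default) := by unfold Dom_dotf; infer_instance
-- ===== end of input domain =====

-- B replaces A's branching indexed loop by an algebraic reformulation:
-- default*sum(r) plus a correction sum (v[i]-default)*r[i] over the zipped overlap; objective: alternative.


-- ===== PORT A =====
def dotf (r : List Int) (v : List Int) (default : Int) : Int :=
  (PySem.List.pyRange 0 (r.length : Int) 1).foldl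
    (fun t i =>
      if (v.length : Int) ≤ i then t + default * PySem.List.pyGetD r i 0
      else t + PySem.List.pyGetD v i 0 * PySem.List.pyGetD r i 0) 0

-- ===== PORT B =====
def dotf_alt (r : List Int) (v : List Int) (default : Int) : Int :=
  (List.zipWith (fun vi ri => (vi - default) * ri) v r).foldl
    (fun t x => t + x) (default * r.sum)

-- ===== PRECONDITION & SPEC =====
def Spec_dotf (r : List Int) (v : List Int) (default : Int) (out : Int) : Prop := out = dotf_alt r v default
instance (r : List Int) (v : List Int) (default : Int) (out : Int) : Decidable (Spec_dotf r v default out) := by unfold Spec_dotf; infer_instance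

-- ===== CLAIM (what is proved, stated in full; the proofs are below) =====
def Claim_equal_dotf : Prop := ∀ (r : List Int) (v : List Int) (default : Int), Dom_dotf r v default → Spec_dotf r v default (dotf r v default)

-- ===== LEMMAS AND PROOFS =====

-- A's indexed sum (range turned into List.range) equals B's reformulation
theorem dotf_sum_eq (r v : List Int) (d : Int) :
    ((List.range r.length).map
      (fun (k : Nat) => if (v.length : Int) ≤ (k : Int) then d * r.getD k 0
                else v.getD k 0 * r.getD k 0)).sum
    = d * r.sum + (List.zipWith (fun vi ri => (vi - d) * ri) v r).sum := by
  induction r generalizing v with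
  | nil => simp
  | cons x r ih =>
    cases v with
    | nil =>
      rw [show (x :: r).length = r.length + 1 from rfl, List.range_succ_eq_map, List.map_cons, List.map_map]
      have h2 : ((List.range r.length).map
          ((fun (k : Nat) => if (([] : List Int).length : Int) ≤ (k : Int)
              then d * (x :: r).getD k 0
              else ([] : List Int).getD k 0 * (x :: r).getD k 0) ∘ Nat.succ)).sum
          = ((List.range r.length).map
              (fun (k : Nat) => if (([] : List Int).length : Int) ≤ (k : Int)
                then d * r.getD k 0
                else ([] : List Int).getD k 0 * r.getD k 0)).sum := by
        apply congrArg
        apply List.map_congr_left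
        intro k _
        simp only [Function.comp_apply, List.getD_cons_succ]
        rw [if_pos (by simp; positivity), if_pos (by simp)]
      rw [List.sum_cons, h2, ih []]
      simp [List.sum_cons]; ring
    | cons y v' =>
      rw [show (x :: r).length = r.length + 1 from rfl, List.range_succ_eq_map, List.map_cons, List.map_map]
      have h2 : ((List.range r.length).map
          ((fun (k : Nat) => if (((y :: v').length : Nat) : Int) ≤ (k : Int)
              then d * (x :: r).getD k 0
              else (y :: v').getD k 0 * (x :: r).getD k 0) ∘ Nat.succ)).sum
          = ((List.range r.length).map
              (fun (k : Nat) => if ((v'.length : Nat) : Int) ≤ (k : Int)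
                then d * r.getD k 0
                else v'.getD k 0 * r.getD k 0)).sum := by
        apply congrArg
        apply List.map_congr_left
        intro k _
        have hiff : ((((y :: v').length : Nat) : Int) ≤ ((Nat.succ k : Nat) : Int)) ↔
            (((v'.length : Nat) : Int) ≤ (k : Int)) := by
          simp only [List.length_cons]; push_cast; omega
        simp only [Function.comp_apply, hiff, List.getD_cons_succ]
      rw [List.sum_cons, h2, ih v']
      have h0 : ¬ ((((y :: v').length : Nat) : Int) ≤ ((0 : Nat) : Int)) := by
        simp only [List.length_cons]; push_cast; omega
      rw [if_neg h0]
      simp only [List.zipWith_cons_cons, List.sum_cons, List.getD_cons_zero]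
      ring

theorem dotf_eq_alt (r v : List Int) (d : Int) : dotf r v d = dotf_alt r v d := by
  unfold dotf dotf_alt
  have hbody : (fun (t i : Int) =>
      if (v.length : Int) ≤ i then t + d * PySem.List.pyGetD r i 0
      else t + PySem.List.pyGetD v i 0 * PySem.List.pyGetD r i 0)
    = (fun (t i : Int) => t +
        (if (v.length : Int) ≤ i then d * PySem.List.pyGetD r i 0
         else PySem.List.pyGetD v i 0 * PySem.List.pyGetD r i 0)) := by
    funext t i; split <;> rfl
  rw [hbody, PySem.List.foldl_add
      (g := fun i => if (v.length : Int) ≤ i then d * PySem.List.pyGetD r i 0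
                     else PySem.List.pyGetD v i 0 * PySem.List.pyGetD r i 0)]
  rw [PySem.List.foldl_add (g := fun x => x), PySem.List.pyRange_one, List.map_map]
  simp only [sub_zero, Int.toNat_natCast, Function.comp_def, zero_add,
    PySem.List.pyGetD_natCast, zero_add, List.map_id_fun', id]
  rw [dotf_sum_eq r v d]

-- ===== VERDICT (by name: the statement is the Claim_ definition above) =====
theorem dotf_spec : Claim_equal_dotf := by
  intro r v d _
  unfold Spec_dotf
  exact dotf_eq_alt r v d
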